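-- pv_equiv track=rewrite | github.com/jverdicc/EvidenceOS | src/evidenceos/physics/units.py | _tokenize_unit_string
-- ===== SOURCE A (Python) =====
-- class DimensionError(Exception):
--     def __init__(self, code: str, message: str, path: str | None = None) -> None:
--         self.code = code
--         self.message = message
--         self.path = path
--         super().__init__(self.__str__())
--
--     def __str__(self) -> str:
--         if self.path:
--             return f"{self.code}: {self.message} ({self.path})"
--         return f"{self.code}: {self.message}"
--
-- def _tokenize_unit_string(unit: str) -> list[str]:
--     tokens: list[str] = []
--     buffer: list[str] = []
--     for char in unit:
--         if char in {"*", "/"}: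
--             if not buffer:
--                 raise DimensionError("E_DIMENSIONAL_INVALID", "Malformed unit string")
--             tokens.append("".join(buffer))
--             buffer = []
--             tokens.append(char)
--         else:
--             buffer.append(char)
--     if not buffer:
--         raise DimensionError("E_DIMENSIONAL_INVALID", "Malformed unit string")
--     tokens.append("".join(buffer))
--     return tokens
-- ===== SOURCE B (Python) =====
-- class DimensionError(Exception):
--     def __init__(self, code: str, message: str, path: str | None = None) -> None:
--         self.code = code
--         self.message = message
--         self.path = path
--         super().__init__(self.__str__())
--
--     def __str__(self) -> str:
--         if self.path:
--             return f"{self.code}: {self.message} ({self.path})"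
--         return f"{self.code}: {self.message}"
--
--
-- def _tokenize_unit_string(unit: str) -> list[str]:
--     # Recursive: slice off the operand before the first operator, recurse on the rest.
--     for i, ch in enumerate(unit):
--         if ch in "*/":
--             head = unit[:i]
--             if not head:
--                 raise DimensionError("E_DIMENSIONAL_INVALID", "Malformed unit string")
--             return [head, ch] + _tokenize_unit_string(unit[i + 1:])
--     if not unit:
--         raise DimensionError("E_DIMENSIONAL_INVALID", "Malformed unit string")
--     return [unit]
-- ===== Notes on version B (the rewrite author's own statement) =====
-- stated objective: alternative
-- what changed: B replaces A's single pass with a mutable character buffer and token accumulator by a recursion that slices the operand before the first operator off the string and recurses on the suffix after it.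
import Mathlib
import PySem

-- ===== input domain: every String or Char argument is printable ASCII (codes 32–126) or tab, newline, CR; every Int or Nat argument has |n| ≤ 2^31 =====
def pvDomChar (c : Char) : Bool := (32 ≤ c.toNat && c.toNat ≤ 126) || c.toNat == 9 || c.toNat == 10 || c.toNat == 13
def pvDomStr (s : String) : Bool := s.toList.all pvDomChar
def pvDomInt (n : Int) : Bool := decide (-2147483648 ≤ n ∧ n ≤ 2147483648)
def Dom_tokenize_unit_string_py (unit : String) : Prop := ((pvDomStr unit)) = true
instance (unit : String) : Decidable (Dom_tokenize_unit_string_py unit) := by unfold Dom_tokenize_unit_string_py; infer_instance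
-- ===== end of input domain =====

-- B replaces A's buffer-accumulating single pass by a recursion that splits off the operand before
-- the first '*'/'/' and recurses on the suffix (alternative decomposition, same cost).


-- ===== PORT A =====
-- A's loop: accumulate chars into `buf`, flush `buf` and the operator into `toks` at each '*'/'/'.
-- `none` models the DimensionError raise (those inputs are excluded by Pre_).
def tokGoA : List Char → List Char → List String → Option (List String)
  | [], buf, toks => if buf.isEmpty then none else some (toks ++ [String.mk buf])
  | c :: rest, buf, toks =>
    if c == '*' || c == '/' then
      if buf.isEmpty then none
      else tokGoA rest [] (toks ++ [String.mk buf, String.mk [c]])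
    else tokGoA rest (buf ++ [c]) toks

def tokenize_unit_string_py (unit : String) : List String :=
  (tokGoA unit.toList [] []).getD []

-- ===== PORT B =====
-- B's `for i, ch in enumerate(unit): if ch in "*/"` + slices unit[:i], unit[i+1:]:
-- returns (chars before the first operator, some (operator, chars after it)) or (all chars, none).
def tokSplitOp : List Char → List Char × Option (Char × List Char)
  | [] => ([], none)
  | c :: rest =>
    if c == '*' || c == '/' then ([], some (c, rest))
    else
      let p := tokSplitOp rest
      (c :: p.1, p.2)

theorem tokSplitOp_rest_lt : ∀ (cs : List Char) (c : Char) (rest : List Char),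
    (tokSplitOp cs).2 = some (c, rest) → rest.length < cs.length := by
  intro cs
  induction cs with
  | nil => intro c rest h; simp [tokSplitOp] at h
  | cons x xs ih =>
    intro c rest h
    by_cases hx : (x == '*' || x == '/') = true
    · simp [tokSplitOp, hx] at h
      simp [h.2]
    · simp [tokSplitOp, hx] at h
      have := ih c rest h
      simp; omega

-- B's recursion: [head, op] ++ tokenize(rest); `none` models the raise on an empty operand.
def tokGoB (cs : List Char) : Option (List String) :=
  match h : tokSplitOp cs with
  | (head, none) => if head.isEmpty then none else some [String.mk head]
  | (head, some (c, rest)) =>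
    if head.isEmpty then none
    else
      match tokGoB rest with
      | none => none
      | some ts => some (String.mk head :: String.mk [c] :: ts)
termination_by cs.length
decreasing_by
  exact tokSplitOp_rest_lt cs c rest (by rw [h])

def tokenize_unit_string_py_alt (unit : String) : List String :=
  (tokGoB unit.toList).getD []

-- ===== PRECONDITION & SPEC =====
-- Pre_ excludes exactly the inputs on which Python A raises DimensionError: an empty string, a
-- leading or trailing operator, or two adjacent operators (an empty operand somewhere).
def Pre_tokenize_unit_string_py (unit : String) : Prop :=
  (unit.toList ≠ []) ∧
  (unit.toList.head?.all (fun c => !(c == '*' || c == '/')) = true) ∧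
  (unit.toList.getLast?.all (fun c => !(c == '*' || c == '/')) = true) ∧
  ((unit.toList.zip unit.toList.tail).all
     (fun p => !((p.1 == '*' || p.1 == '/') && (p.2 == '*' || p.2 == '/'))) = true)
instance (unit : String) : Decidable (Pre_tokenize_unit_string_py unit) := by
  unfold Pre_tokenize_unit_string_py; infer_instance

def pvWitness_tokenize_unit_string_py : String := "kg*m/s"

def Spec_tokenize_unit_string_py (unit : String) (out : List String) : Prop := out = tokenize_unit_string_py_alt unit
instance (unit : String) (out : List String) : Decidable (Spec_tokenize_unit_string_py unit out) := by unfold Spec_tokenize_unit_string_py; infer_instance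

-- ===== CLAIM (what is proved, stated in full; the proofs are below) =====
def Claim_equal_tokenize_unit_string_py : Prop := ∀ (unit : String), Dom_tokenize_unit_string_py unit → Pre_tokenize_unit_string_py unit → Spec_tokenize_unit_string_py unit (tokenize_unit_string_py unit)

-- ===== LEMMAS AND PROOFS =====

-- Unfolding lemmas for tokGoB's dependent match on `tokSplitOp cs`.
theorem tokGoB_of_none (cs hd : List Char) (hs : tokSplitOp cs = (hd, none)) :
    tokGoB cs = if hd.isEmpty then none else some [String.mk hd] := by
  conv_lhs => rw [tokGoB]
  split
  · rename_i head hmatch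
    rw [hs] at hmatch
    cases hmatch
    rfl
  · rename_i head c rest hmatch
    rw [hs] at hmatch
    cases hmatch

theorem tokGoB_of_some (cs hd : List Char) (c : Char) (rest : List Char)
    (hs : tokSplitOp cs = (hd, some (c, rest))) :
    tokGoB cs = if hd.isEmpty then none
      else match tokGoB rest with
        | none => none
        | some ts => some (String.mk hd :: String.mk [c] :: ts) := by
  conv_lhs => rw [tokGoB]
  split
  · rename_i head hmatch
    rw [hs] at hmatch
    cases hmatch
  · rename_i head c' rest' hmatch
    rw [hs] at hmatch
    cases hmatch
    rfl

-- Splitting after a prefix of non-operator characters just prepends that prefix to the head part.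
theorem tokSplitOp_prefix (buf cs : List Char)
    (hb : ∀ c ∈ buf, (c == '*' || c == '/') = false) :
    tokSplitOp (buf ++ cs) = (buf ++ (tokSplitOp cs).1, (tokSplitOp cs).2) := by
  induction buf with
  | nil => simp
  | cons x xs ih =>
    have hx : (x == '*' || x == '/') = false := hb x (by simp)
    have ihx := ih (fun c hc => hb c (by simp [hc]))
    simp [tokSplitOp, hx, ihx]

-- Loop invariant: running A's loop with pending buffer `buf` (all non-operators) and emitted
-- tokens `toks` computes B's recursion on `buf ++ cs`, prefixed with `toks`.
theorem tokGoA_eq_tokGoB (cs : List Char) : ∀ (buf : List Char) (toks : List String),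
    (∀ c ∈ buf, (c == '*' || c == '/') = false) →
    tokGoA cs buf toks = (tokGoB (buf ++ cs)).map (fun t => toks ++ t) := by
  induction cs with
  | nil =>
    intro buf toks hb
    have hs : tokSplitOp (buf ++ []) = (buf, none) := by
      have := tokSplitOp_prefix buf [] hb
      simpa [tokSplitOp] using this
    rw [tokGoB_of_none (buf ++ []) buf hs]
    by_cases h : buf.isEmpty
    · simp [tokGoA, h]
    · simp [tokGoA, h]
  | cons c rest ih =>
    intro buf toks hb
    by_cases hc : (c == '*' || c == '/') = true
    · have hs : tokSplitOp (buf ++ c :: rest) = (buf, some (c, rest)) := by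
        have := tokSplitOp_prefix buf (c :: rest) hb
        simpa [tokSplitOp, hc] using this
      rw [tokGoB_of_some (buf ++ c :: rest) buf c rest hs]
      by_cases h : buf.isEmpty
      · simp [tokGoA, hc, h]
      · have ihe := ih [] (toks ++ [String.mk buf, String.mk [c]]) (by simp)
        simp only [List.nil_append] at ihe
        simp only [tokGoA, hc, if_true, h, Bool.false_eq_true, if_false, ihe]
        cases tokGoB rest with
        | none => simp
        | some ts => simp
    · have hb' : ∀ x ∈ buf ++ [c], (x == '*' || x == '/') = false := by
        intro x hx
        rcases List.mem_append.mp hx with h1 | h1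
        · exact hb x h1
        · simp at h1; subst h1; simpa using hc
      have ihe := ih (buf ++ [c]) toks hb'
      rw [List.append_assoc] at ihe
      simp only [List.singleton_append] at ihe
      simpa [tokGoA, hc] using ihe

-- ===== VERDICT (by name: the statement is the Claim_ definition above) =====
theorem tokenize_unit_string_py_spec : Claim_equal_tokenize_unit_string_py := by
  intro unit _ _
  unfold Spec_tokenize_unit_string_py tokenize_unit_string_py tokenize_unit_string_py_alt
  rw [tokGoA_eq_tokGoB unit.toList [] [] (by simp)]
  simp only [List.nil_append]
  cases tokGoB unit.toList <;> simp
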